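-- pv_equiv track=rewrite | github.com/wubugui/GameDraft | tools/editor/shared/ink_setflag_tag.py | _decode_ink_quoted
-- ===== SOURCE A (Python) =====
-- def _decode_ink_quoted(s: str) -> tuple[str, int] | None:
--     if not s:
--         return None
--     q = s[0]
--     if q not in "\"'":
--         return None
--     i = 1
--     out: list[str] = []
--     while i < len(s):
--         c = s[i]
--         if c == "\\" and i + 1 < len(s):
--             n = s[i + 1]
--             if n == "n":
--                 out.append("\n")
--                 i += 2
--                 continue
--             if n == "t":
--                 out.append("\t")
--                 i += 2
--                 continue
--             if n == "r":
--                 out.append("\r")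
--                 i += 2
--                 continue
--             if n in "\\\"'":
--                 out.append(n)
--                 i += 2
--                 continue
--             out.append(n)
--             i += 2
--             continue
--         if c == q:
--             return "".join(out), i + 1
--         out.append(c)
--         i += 1
--     return None
-- ===== SOURCE B (Python) =====
-- def _decode_ink_quoted(s: str) -> tuple[str, int] | None:
--     if not s or s[0] not in "\"'":
--         return None
--     q = s[0]
--     # pass 1: locate the closing unescaped quote
--     i, n, end = 1, len(s), None
--     while i < n:
--         if s[i] == "\\" and i + 1 < n:
--             i += 2
--         elif s[i] == q:
--             end = i
--             break
--         else:
--             i += 1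
--     if end is None:
--         return None
--     # pass 2: decode the inner slice
--     inner = s[1:end]
--     esc = {"n": "\n", "t": "\t", "r": "\r"}
--     out = []
--     j, m = 0, len(inner)
--     while j < m:
--         if inner[j] == "\\" and j + 1 < m:
--             out.append(esc.get(inner[j + 1], inner[j + 1]))
--             j += 2
--         else:
--             out.append(inner[j])
--             j += 1
--     return "".join(out), end + 1
-- ===== Notes on version B (the rewrite author's own statement) =====
-- stated objective: alternative
-- what changed: A decodes in a single while-loop that appends to an accumulator as it scans; B first locates the closing unescaped quote with a plain skip-scan, then decodes the inner slice in a second pass via an escape dict with get(ch, ch).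
import Mathlib
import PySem

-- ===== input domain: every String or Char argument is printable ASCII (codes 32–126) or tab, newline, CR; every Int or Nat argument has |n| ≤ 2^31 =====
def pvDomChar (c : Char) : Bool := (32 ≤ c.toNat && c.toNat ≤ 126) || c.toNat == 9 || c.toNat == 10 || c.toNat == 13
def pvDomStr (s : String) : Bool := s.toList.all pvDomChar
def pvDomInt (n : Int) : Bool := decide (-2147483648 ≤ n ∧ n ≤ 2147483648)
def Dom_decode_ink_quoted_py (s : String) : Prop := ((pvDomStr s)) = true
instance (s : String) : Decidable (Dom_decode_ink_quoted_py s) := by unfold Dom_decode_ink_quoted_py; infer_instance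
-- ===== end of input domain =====

-- B replaces A's single scan-and-accumulate loop by a two-pass decomposition
-- (locate the closing unescaped quote, then decode the inner slice via an escape map);
-- objective: alternative decomposition, same cost.

-- ===== PORT A =====
-- A's while-loop: remaining suffix, current index i, reversed output accumulator.
def aLoop (q : Char) : List Char → Int → List Char → Option (String × Int)
  | [], _, _ => none
  | c :: rest, i, out =>
    if c = '\\' then
      match rest with
      | n :: rest2 =>
        if n = 'n' then aLoop q rest2 (i+2) ('\n' :: out)
        else if n = 't' then aLoop q rest2 (i+2) ('\t' :: out)
        else if n = 'r' then aLoop q rest2 (i+2) ('\r' :: out)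
        else if n = '\\' ∨ n = '"' ∨ n = '\'' then aLoop q rest2 (i+2) (n :: out)
        else aLoop q rest2 (i+2) (n :: out)
      | [] =>  -- i + 1 < len(s) is false: fall through to the quote test
        if c = q then some (String.ofList out.reverse, i + 1)
        else aLoop q [] (i+1) (c :: out)
    else
      if c = q then some (String.ofList out.reverse, i + 1)
      else aLoop q rest (i+1) (c :: out)

def decode_ink_quoted_py (s : String) : Option (String × Int) :=
  match s.toList with
  | [] => none
  | q :: rest => if q = '"' ∨ q = '\'' then aLoop q rest 1 [] else none

-- ===== PORT B =====
-- pass 1: offset of the closing unescaped quote within the suffix after the opening quote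
def findCloseOff (q : Char) : List Char → Option Nat
  | [] => none
  | '\\' :: _ :: rest2 => (findCloseOff q rest2).map (· + 2)
  | c :: rest => if c = q then some 0 else (findCloseOff q rest).map (· + 1)

-- esc.get(ch, ch)
def escGet (n : Char) : Char :=
  PySem.Dict.getD (PySem.Dict.ofList [('n', '\n'), ('t', '\t'), ('r', '\r')]) n n

-- pass 2: decode the inner slice
def decodeInner : List Char → List Char
  | [] => []
  | '\\' :: n :: rest2 => escGet n :: decodeInner rest2
  | c :: rest => c :: decodeInner rest

def decode_ink_quoted_py_alt (s : String) : Option (String × Int) :=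
  match s.toList with
  | [] => none
  | q :: rest =>
    if q = '"' ∨ q = '\'' then
      match findCloseOff q rest with
      | none => none
      | some k => some (String.ofList (decodeInner (rest.take k)), ((1 + (k : Int)) + 1))
    else none

-- ===== PRECONDITION & SPEC =====
def Spec_decode_ink_quoted_py (s : String) (out : Option (String × Int)) : Prop := out = decode_ink_quoted_py_alt s
instance (s : String) (out : Option (String × Int)) : Decidable (Spec_decode_ink_quoted_py s out) := by unfold Spec_decode_ink_quoted_py; infer_instance

-- ===== CLAIM (what is proved, stated in full; the proofs are below) =====
def Claim_equal_decode_ink_quoted_py : Prop := ∀ (s : String), Dom_decode_ink_quoted_py s → Spec_decode_ink_quoted_py s (decode_ink_quoted_py s)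

-- ===== LEMMAS AND PROOFS =====

lemma escGet_val (n : Char) :
    escGet n = if n = 'n' then '\n' else if n = 't' then '\t' else if n = 'r' then '\r' else n := by
  by_cases h1 : n = 'n'
  · subst h1; decide
  by_cases h2 : n = 't'
  · subst h2; decide
  by_cases h3 : n = 'r'
  · subst h3; decide
  have e1 : ('n' == n) = false := beq_eq_false_iff_ne.mpr (fun h => h1 h.symm)
  have e2 : ('t' == n) = false := beq_eq_false_iff_ne.mpr (fun h => h2 h.symm)
  have e3 : ('r' == n) = false := beq_eq_false_iff_ne.mpr (fun h => h3 h.symm)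
  simp [escGet, PySem.Dict.getD, PySem.Dict.ofList, PySem.Dict.empty, PySem.Dict.update,
    PySem.Dict.insert, PySem.Dict.get?, List.find?, e1, e2, e3, h1, h2, h3]

-- one unfolding step of A's loop
lemma aLoop_cons (q c : Char) (rest : List Char) (i : Int) (out : List Char) :
    aLoop q (c :: rest) i out =
      (if c = '\\' then
        match rest with
        | n :: rest2 =>
          if n = 'n' then aLoop q rest2 (i+2) ('\n' :: out)
          else if n = 't' then aLoop q rest2 (i+2) ('\t' :: out)
          else if n = 'r' then aLoop q rest2 (i+2) ('\r' :: out)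
          else if n = '\\' ∨ n = '"' ∨ n = '\'' then aLoop q rest2 (i+2) (n :: out)
          else aLoop q rest2 (i+2) (n :: out)
        | [] =>
          if c = q then some (String.ofList out.reverse, i + 1)
          else aLoop q [] (i+1) (c :: out)
      else
        if c = q then some (String.ofList out.reverse, i + 1)
        else aLoop q rest (i+1) (c :: out)) := by
  conv_lhs => rw [aLoop.eq_def]

lemma findCloseOff_cons (q c : Char) (rest : List Char) (hc : c ≠ '\\') :
    findCloseOff q (c :: rest) = if c = q then some 0 else (findCloseOff q rest).map (· + 1) := by
  rw [findCloseOff.eq_def]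
  split
  · next heq => simp at heq
  · next heq => injection heq with h1 _; exact absurd h1 hc
  · next heq => injection heq with h1 h2; subst h1; subst h2; rfl

lemma findCloseOff_single (q c : Char) : findCloseOff q [c] = if c = q then some 0 else none := by
  rw [findCloseOff.eq_def]
  split
  · next heq => simp at heq
  · next heq => injection heq with _ h2; simp at h2
  · next heq =>
    injection heq with h1 h2
    subst h1; subst h2
    simp [findCloseOff]

lemma decodeInner_cons (c : Char) (rest : List Char) (hc : c ≠ '\\') :
    decodeInner (c :: rest) = c :: decodeInner rest := by
  rw [decodeInner.eq_def]
  split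
  · next heq => simp at heq
  · next heq => injection heq with h1 _; exact absurd h1 hc
  · next heq => injection heq with h1 h2; subst h1; subst h2; rfl

-- the single loop of A computes the two passes of B
lemma aLoop_eq (q : Char) (hq : q ≠ '\\') : ∀ (cs : List Char) (i : Int) (out : List Char),
    aLoop q cs i out = (findCloseOff q cs).map
      (fun k => (String.ofList (out.reverse ++ decodeInner (cs.take k)), i + k + 1)) := by
  intro cs
  induction cs using findCloseOff.induct (q := q) with
  | case1 => intro i out; simp [aLoop, findCloseOff]
  | case2 n rest2 ih =>
    intro i out
    have ha : aLoop q ('\\' :: n :: rest2) i out =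
        (if n = 'n' then aLoop q rest2 (i+2) ('\n' :: out)
        else if n = 't' then aLoop q rest2 (i+2) ('\t' :: out)
        else if n = 'r' then aLoop q rest2 (i+2) ('\r' :: out)
        else if n = '\\' ∨ n = '"' ∨ n = '\'' then aLoop q rest2 (i+2) (n :: out)
        else aLoop q rest2 (i+2) (n :: out)) := by
      rw [aLoop_cons]; simp
    have key : aLoop q rest2 (i+2) (escGet n :: out) =
        (findCloseOff q ('\\' :: n :: rest2)).map
          (fun k => (String.ofList (out.reverse ++ decodeInner (('\\' :: n :: rest2).take k)), i + k + 1)) := by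
      rw [ih]
      show _ = ((findCloseOff q rest2).map (· + 2)).map _
      cases findCloseOff q rest2 with
      | none => rfl
      | some k =>
        simp only [Option.map_some]
        refine congrArg some (Prod.ext ?_ ?_)
        · show String.ofList ((escGet n :: out).reverse ++ decodeInner (rest2.take k)) =
              String.ofList (out.reverse ++ decodeInner ('\\' :: n :: rest2.take k))
          simp [decodeInner]
        · show i + 2 + (k : Int) + 1 = i + ((k + 2 : Nat) : Int) + 1
          push_cast; ring
    rw [ha, ← key, escGet_val]
    split_ifs <;> rfl
  | case3 rest h =>
    intro i out
    have ha : aLoop q (q :: rest) i out = some (String.ofList out.reverse, i + 1) := by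
      rw [aLoop_cons, if_neg hq, if_pos rfl]
    rw [ha, findCloseOff_cons q q rest hq, if_pos rfl]
    simp [decodeInner]
  | case4 c rest h hcq ih =>
    intro i out
    by_cases hc : c = '\\'
    · subst hc
      cases rest with
      | cons a b => exact (h a b rfl rfl).elim
      | nil =>
        have h1 : aLoop q ['\\'] i out = none := by
          rw [aLoop_cons, if_pos rfl]
          simp only
          rw [if_neg hcq]
          simp [aLoop]
        have h2 : findCloseOff q ['\\'] = none := by
          rw [findCloseOff_single, if_neg hcq]
        rw [h1, h2]; rfl
    · have ha : aLoop q (c :: rest) i out = aLoop q rest (i+1) (c :: out) := by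
        rw [aLoop_cons, if_neg hc, if_neg hcq]
      rw [ha, ih, findCloseOff_cons q c rest hc, if_neg hcq]
      cases findCloseOff q rest with
      | none => rfl
      | some k =>
        simp only [Option.map_some]
        refine congrArg some (Prod.ext ?_ ?_)
        · show String.ofList ((c :: out).reverse ++ decodeInner (rest.take k)) =
              String.ofList (out.reverse ++ decodeInner ((c :: rest).take (k + 1)))
          rw [List.take_succ_cons, decodeInner_cons c _ hc]
          simp
        · show i + 1 + (k : Int) + 1 = i + ((k + 1 : Nat) : Int) + 1
          push_cast; ring

-- ===== VERDICT (by name: the statement is the Claim_ definition above) =====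
theorem decode_ink_quoted_py_spec : Claim_equal_decode_ink_quoted_py := by
  intro s _
  show decode_ink_quoted_py s = decode_ink_quoted_py_alt s
  unfold decode_ink_quoted_py decode_ink_quoted_py_alt
  cases s.toList with
  | nil => rfl
  | cons q rest =>
    dsimp only
    by_cases hq : q = '"' ∨ q = '\''
    · rw [if_pos hq, if_pos hq]
      have hq' : q ≠ '\\' := by rcases hq with h | h <;> subst h <;> decide
      rw [aLoop_eq q hq' rest 1 []]
      cases findCloseOff q rest with
      | none => rfl
      | some k =>
        simp only [Option.map_some, List.reverse_nil, List.nil_append]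
    · simp [hq]
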